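-- pv_equiv track=rewrite | github.com/matiaszanolli/sega-vr-disasm | tools/generate_68k_asm.py | format_movem_mask
-- ===== SOURCE A (Python) =====
-- def format_movem_mask(mask: int, predecrement: bool) -> str:
--     """Format MOVEM register mask."""
--     regs = []
--     if predecrement:
--         # For -(An), bit 15=D0, bit 8=D7, bit 7=A0, bit 0=A7
--         for i in range(8):
--             if mask & (1 << (15 - i)):
--                 regs.append(f"D{i}")
--         for i in range(8):
--             if mask & (1 << (7 - i)):
--                 regs.append(f"A{i}")
--     else:
--         # For (An)+, bit 0=D0, bit 7=D7, bit 8=A0, bit 15=A7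
--         for i in range(8):
--             if mask & (1 << i):
--                 regs.append(f"D{i}")
--         for i in range(8):
--             if mask & (1 << (8 + i)):
--                 regs.append(f"A{i}")
--     return "/".join(regs) if regs else "?"
-- ===== SOURCE B (Python) =====
-- def _name(k: int, predecrement: bool) -> str:
--     """Register name for bit position k of the (masked) MOVEM word."""
--     q = 15 - k if predecrement else k
--     return f"D{q}" if q < 8 else f"A{q - 8}"
--
--
-- def _decode(m: int, k: int, predecrement: bool) -> list:
--     """Names of the set bits of m, positions k, k+1, ..., ascending."""
--     if m == 0:
--         return []
--     rest = _decode(m >> 1, k + 1, predecrement)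
--     if m & 1:
--         return [_name(k, predecrement)] + rest
--     return rest
--
--
-- def format_movem_mask(mask: int, predecrement: bool) -> str:
--     """Format MOVEM register mask by recursive halving of the masked word."""
--     names = _decode(mask & 0xFFFF, 0, predecrement)
--     if predecrement:
--         names.reverse()
--     return "/".join(names) if names else "?"
-- ===== Notes on version B (the rewrite author's own statement) =====
-- stated objective: alternative
-- what changed: A scans fixed bit positions with four mode-specific 8-iteration loops appending hard-wired names; B recursively halves the masked word, emitting a name computed arithmetically from each set bit's position (15-k for predecrement), and performs one final reversal for predecrement mode.
import Mathlib
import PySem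

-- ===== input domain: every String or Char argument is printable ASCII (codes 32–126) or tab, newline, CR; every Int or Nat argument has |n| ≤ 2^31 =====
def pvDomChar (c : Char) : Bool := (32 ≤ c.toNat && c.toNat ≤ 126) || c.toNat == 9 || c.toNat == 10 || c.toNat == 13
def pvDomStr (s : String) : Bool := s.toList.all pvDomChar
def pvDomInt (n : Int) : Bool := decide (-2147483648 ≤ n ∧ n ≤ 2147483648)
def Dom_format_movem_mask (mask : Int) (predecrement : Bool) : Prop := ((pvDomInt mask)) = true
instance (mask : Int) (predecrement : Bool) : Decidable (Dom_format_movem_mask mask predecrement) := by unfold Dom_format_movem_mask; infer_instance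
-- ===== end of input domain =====

-- B replaces A's four mode-specific fixed bit-position loops by a recursive halving of the
-- masked word that names each set bit arithmetically from its position, plus one final
-- reversal for predecrement mode (objective: alternative decomposition, same cost).

-- ===== PORT A =====
def format_movem_mask (mask : Int) (predecrement : Bool) : String :=
  let regs : List String := []
  let regs :=
    if predecrement then
      -- For -(An), bit 15=D0, bit 8=D7, bit 7=A0, bit 0=A7
      let regs := (PySem.List.pyRange 0 8 1).foldl
        (fun regs i => if PySem.Int.band mask ((1:Int) <<< (15 - i)) ≠ 0
          then regs ++ ["D" ++ PySem.Int.toStr i] else regs) regs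
      let regs := (PySem.List.pyRange 0 8 1).foldl
        (fun regs i => if PySem.Int.band mask ((1:Int) <<< (7 - i)) ≠ 0
          then regs ++ ["A" ++ PySem.Int.toStr i] else regs) regs
      regs
    else
      -- For (An)+, bit 0=D0, bit 7=D7, bit 8=A0, bit 15=A7
      let regs := (PySem.List.pyRange 0 8 1).foldl
        (fun regs i => if PySem.Int.band mask ((1:Int) <<< i) ≠ 0
          then regs ++ ["D" ++ PySem.Int.toStr i] else regs) regs
      let regs := (PySem.List.pyRange 0 8 1).foldl
        (fun regs i => if PySem.Int.band mask ((1:Int) <<< (8 + i)) ≠ 0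
          then regs ++ ["A" ++ PySem.Int.toStr i] else regs) regs
      regs
  if regs ≠ [] then PySem.Str.join "/" regs else "?"

-- ===== PORT B =====
/-- Source B `_name`: register name for bit position k of the (masked) MOVEM word. -/
def pvName (k : Int) (predecrement : Bool) : String :=
  let q := if predecrement then 15 - k else k
  if q < 8 then "D" ++ PySem.Int.toStr q else "A" ++ PySem.Int.toStr (q - 8)

/-- Source B `_decode`: names of the set bits of m at positions k, k+1, …, ascending.
    m is `mask & 0xFFFF`, always nonnegative in Source B, hence a Nat here (exact). -/
def pvDecode (m : Nat) (k : Int) (predecrement : Bool) : List String :=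
  if _h : m = 0 then []
  else
    let rest := pvDecode (m >>> 1) (k + 1) predecrement
    if m &&& 1 = 1 then pvName k predecrement :: rest else rest
termination_by m
decreasing_by simpa [Nat.shiftRight_one] using Nat.div_lt_self (Nat.pos_of_ne_zero _h) one_lt_two

def format_movem_mask_alt (mask : Int) (predecrement : Bool) : String :=
  let names := pvDecode (PySem.Int.band mask 0xFFFF).toNat 0 predecrement
  let names := if predecrement then names.reverse else names
  if names ≠ [] then PySem.Str.join "/" names else "?"

-- ===== PRECONDITION & SPEC =====
def Spec_format_movem_mask (mask : Int) (predecrement : Bool) (out : String) : Prop := out = format_movem_mask_alt mask predecrement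
instance (mask : Int) (predecrement : Bool) (out : String) : Decidable (Spec_format_movem_mask mask predecrement out) := by unfold Spec_format_movem_mask; infer_instance

-- ===== CLAIM (what is proved, stated in full; the proofs are below) =====
def Claim_equal_format_movem_mask : Prop := ∀ (mask : Int) (predecrement : Bool), Dom_format_movem_mask mask predecrement → Spec_format_movem_mask mask predecrement (format_movem_mask mask predecrement)

-- ===== LEMMAS AND PROOFS =====

/-- Bit `k` of the low 16 bits of `mask` (Python's bit `k` of `mask & 0xFFFF`). -/
def pvBit (mask : Int) (k : Nat) : Bool := decide ((mask % 65536).toNat / 2 ^ k % 2 = 1)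

/-- Conditional concatenation: common normal form of both programs' register lists. -/
def pvEmit : List (Bool × String) → List String
  | [] => []
  | (b, s) :: t => (if b then [s] else []) ++ pvEmit t

theorem pvEmit_append (l₁ l₂ : List (Bool × String)) :
    pvEmit (l₁ ++ l₂) = pvEmit l₁ ++ pvEmit l₂ := by
  induction l₁ with
  | nil => simp [pvEmit]
  | cons x t ih => cases x; simp [pvEmit, ih]

theorem pvEmit_reverse (l : List (Bool × String)) :
    pvEmit l.reverse = (pvEmit l).reverse := by
  induction l with
  | nil => rfl
  | cons x t ih =>
    cases x with
    | mk b s => cases b <;> simp [pvEmit, pvEmit_append, ih]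

theorem pv_foldl_emit (p : Int → Prop) [DecidablePred p] (f : Int → String) :
    ∀ (l : List Int) (acc : List String),
      l.foldl (fun regs i => if p i then regs ++ [f i] else regs) acc
        = acc ++ pvEmit (l.map (fun i => (decide (p i), f i))) := by
  intro l
  induction l with
  | nil => intro acc; simp [pvEmit]
  | cons x t ih =>
    intro acc
    by_cases h : p x <;> simp [List.foldl_cons, h, ih, pvEmit, List.append_assoc]

/-- low 16 bits only: dividing `n % 65536` instead of `n` does not change bit `k < 16`. -/
theorem pv_lowbits (n k : Nat) (hk : k < 16) : n % 65536 / 2 ^ k % 2 = n / 2 ^ k % 2 := by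
  have h : (65536 : Nat) = 2 ^ k * 2 ^ (16 - k) := by
    rw [← pow_add, show k + (16 - k) = 16 by omega]; norm_num
  rw [h, Nat.mod_mul_right_div_self,
    Nat.mod_mod_of_dvd _ (dvd_pow_self 2 (by omega : 16 - k ≠ 0))]

/-- complementing the low 16 bits flips bit `k < 16`. -/
theorem pv_flip (s k : Nat) (hs : s < 65536) (hk : k < 16) :
    (65535 - s) / 2 ^ k % 2 = 1 - s / 2 ^ k % 2 := by
  interval_cases k <;> omega

theorem pv_band_negSucc (n b : Nat) :
    PySem.Int.band (Int.negSucc n) ((b : Nat) : Int) = ((b - (b &&& n) : Nat) : Int) := by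
  simp [PySem.Int.band, Int.negSucc_not_nonneg, Int.neg_negSucc]

theorem pv_band_low (mask : Int) : PySem.Int.band mask 65535 = mask % 65536 := by
  cases mask with
  | ofNat n =>
    rw [show (Int.ofNat n) = ((n : Nat) : Int) from rfl,
      show (65535 : Int) = ((65535 : Nat) : Int) from rfl,
      PySem.Int.band_natCast,
      show (65535 : Nat) = 2 ^ 16 - 1 from by norm_num,
      Nat.and_two_pow_sub_one_eq_mod]
    have h16 : (2 : Nat) ^ 16 = 65536 := by norm_num
    rw [h16]
    omega
  | negSucc n =>
    rw [show (65535 : Int) = ((65535 : Nat) : Int) from rfl, pv_band_negSucc]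
    have hand : 65535 &&& n = n % 65536 := by
      rw [Nat.land_comm, show (65535 : Nat) = 2 ^ 16 - 1 from by norm_num,
        Nat.and_two_pow_sub_one_eq_mod]
    rw [hand, Int.negSucc_eq]
    omega

theorem pv_K1 (mask : Int) (k : Nat) (hk : k < 16) :
    (PySem.Int.band mask ((2 : Int) ^ k) ≠ 0) ↔ pvBit mask k = true := by
  have h2 : ((2 : Int) ^ k) = ((2 ^ k : Nat) : Int) := by push_cast; ring
  cases mask with
  | ofNat n =>
    rw [show (Int.ofNat n) = ((n : Nat) : Int) from rfl, h2, PySem.Int.band_natCast,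
      Nat.and_two_pow]
    have hr : (((n : Nat) : Int) % 65536).toNat = n % 65536 := by omega
    unfold pvBit
    rw [hr, pv_lowbits n k hk, ← Nat.testBit_eq_decide_div_mod_eq]
    cases n.testBit k <;> simp
  | negSucc n =>
    rw [h2, pv_band_negSucc, Nat.two_pow_and]
    have hr : ((Int.negSucc n) % 65536).toNat = 65535 - n % 65536 := by
      rw [Int.negSucc_eq]; omega
    unfold pvBit
    rw [hr, pv_flip (n % 65536) k (Nat.mod_lt _ (by norm_num)) hk, pv_lowbits n k hk]
    have hdm : n / 2 ^ k % 2 = (n.testBit k).toNat := by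
      rw [Nat.testBit_eq_decide_div_mod_eq]
      rcases Nat.mod_two_eq_zero_or_one (n / 2 ^ k) with h | h <;> simp [h]
    rw [hdm]
    cases n.testBit k <;> simp

theorem pv_testBit_pvBit (mask : Int) (k : Nat) :
    ((mask % 65536).toNat).testBit k = pvBit mask k := by
  rw [Nat.testBit_eq_decide_div_mod_eq]; rfl

theorem pv_decide_bool (b : Bool) : decide (b = true) = b := by
  cases b <;> simp

/-- B's recursive decode is the conditional concatenation over the first w bit positions. -/
theorem pv_decode_emit (pd : Bool) :
    ∀ (w m : Nat) (k : Int), m < 2 ^ w →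
      pvDecode m k pd
        = pvEmit ((List.range w).map (fun j => (m.testBit j, pvName (k + (j : Int)) pd))) := by
  intro w
  induction w with
  | zero =>
    intro m k hm
    have h0 : m = 0 := by omega
    subst h0
    rw [pvDecode]
    simp [pvEmit]
  | succ w ih =>
    intro m k hm
    rw [pvDecode]
    by_cases h0 : m = 0
    · subst h0
      rw [dif_pos rfl]
      have hz : ∀ (l : List Nat) (f : Nat → String),
          pvEmit (l.map (fun j => (false, f j))) = [] := by
        intro l f
        induction l with
        | nil => rfl
        | cons a t iht => simpa [pvEmit] using iht
      simp only [Nat.zero_testBit]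
      exact (hz _ _).symm
    · rw [dif_neg h0]
      have hlt : m >>> 1 < 2 ^ w := by
        rw [Nat.shiftRight_one]
        have hp : (2 : Nat) ^ (w + 1) = 2 ^ w * 2 := by ring
        omega
      rw [List.range_succ_eq_map, List.map_cons, List.map_map]
      have hmap : ((List.range w).map ((fun j => (m.testBit j, pvName (k + (j : Int)) pd)) ∘ Nat.succ))
          = (List.range w).map (fun j => ((m >>> 1).testBit j, pvName ((k + 1) + (j : Int)) pd)) := by
        apply List.map_congr_left
        intro j _
        simp only [Function.comp_apply]
        have hk : k + ((j + 1 : Nat) : Int) = (k + 1) + (j : Int) := by push_cast; ring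
        rw [show Nat.succ j = j + 1 from rfl, Nat.testBit_add_one, ← Nat.shiftRight_one, hk]
      rw [hmap]
      have hih := ih (m >>> 1) (k + 1) hlt
      by_cases hb : m % 2 = 1
      · have h1 : m &&& 1 = 1 := by rw [Nat.and_one_is_mod]; exact hb
        have ht : m.testBit 0 = true := by rw [Nat.testBit_zero]; simp [hb]
        simp [pvEmit, h1, ht, hih]
      · have h2 : m % 2 = 0 := by omega
        have ht : m.testBit 0 = false := by rw [Nat.testBit_zero]; simp [hb]
        simp [pvEmit, h2, ht, hih]

-- ===== VERDICT (by name: the statement is the Claim_ definition above) =====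
theorem format_movem_mask_spec : Claim_equal_format_movem_mask := by
  unfold Claim_equal_format_movem_mask
  intro mask predecrement _
  unfold Spec_format_movem_mask
  have hmlt : (mask % 65536).toNat < 2 ^ 16 := by
    have h1 : 0 ≤ mask % 65536 := Int.emod_nonneg _ (by norm_num)
    have h2 : mask % 65536 < 65536 := Int.emod_lt_of_pos _ (by norm_num)
    have h3 : (2 : Nat) ^ 16 = 65536 := by norm_num
    omega
  have hbl : PySem.Int.band mask 0xFFFF = mask % 65536 := pv_band_low mask
  have c0 : (PySem.Int.band mask 1 ≠ 0) ↔ pvBit mask 0 = true := by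
    have h := pv_K1 mask 0 (by norm_num); norm_num at h; exact h
  have c1 : (PySem.Int.band mask 2 ≠ 0) ↔ pvBit mask 1 = true := by
    have h := pv_K1 mask 1 (by norm_num); norm_num at h; exact h
  have c2 : (PySem.Int.band mask 4 ≠ 0) ↔ pvBit mask 2 = true := by
    have h := pv_K1 mask 2 (by norm_num); norm_num at h; exact h
  have c3 : (PySem.Int.band mask 8 ≠ 0) ↔ pvBit mask 3 = true := by
    have h := pv_K1 mask 3 (by norm_num); norm_num at h; exact h
  have c4 : (PySem.Int.band mask 16 ≠ 0) ↔ pvBit mask 4 = true := by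
    have h := pv_K1 mask 4 (by norm_num); norm_num at h; exact h
  have c5 : (PySem.Int.band mask 32 ≠ 0) ↔ pvBit mask 5 = true := by
    have h := pv_K1 mask 5 (by norm_num); norm_num at h; exact h
  have c6 : (PySem.Int.band mask 64 ≠ 0) ↔ pvBit mask 6 = true := by
    have h := pv_K1 mask 6 (by norm_num); norm_num at h; exact h
  have c7 : (PySem.Int.band mask 128 ≠ 0) ↔ pvBit mask 7 = true := by
    have h := pv_K1 mask 7 (by norm_num); norm_num at h; exact h
  have c8 : (PySem.Int.band mask 256 ≠ 0) ↔ pvBit mask 8 = true := by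
    have h := pv_K1 mask 8 (by norm_num); norm_num at h; exact h
  have c9 : (PySem.Int.band mask 512 ≠ 0) ↔ pvBit mask 9 = true := by
    have h := pv_K1 mask 9 (by norm_num); norm_num at h; exact h
  have c10 : (PySem.Int.band mask 1024 ≠ 0) ↔ pvBit mask 10 = true := by
    have h := pv_K1 mask 10 (by norm_num); norm_num at h; exact h
  have c11 : (PySem.Int.band mask 2048 ≠ 0) ↔ pvBit mask 11 = true := by
    have h := pv_K1 mask 11 (by norm_num); norm_num at h; exact h
  have c12 : (PySem.Int.band mask 4096 ≠ 0) ↔ pvBit mask 12 = true := by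
    have h := pv_K1 mask 12 (by norm_num); norm_num at h; exact h
  have c13 : (PySem.Int.band mask 8192 ≠ 0) ↔ pvBit mask 13 = true := by
    have h := pv_K1 mask 13 (by norm_num); norm_num at h; exact h
  have c14 : (PySem.Int.band mask 16384 ≠ 0) ↔ pvBit mask 14 = true := by
    have h := pv_K1 mask 14 (by norm_num); norm_num at h; exact h
  have c15 : (PySem.Int.band mask 32768 ≠ 0) ↔ pvBit mask 15 = true := by
    have h := pv_K1 mask 15 (by norm_num); norm_num at h; exact h
  have sp0 : (1 : Int) <<< ((15 : Int) - 0) = 32768 := by decide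
  have sq0 : (1 : Int) <<< ((7 : Int) - 0) = 128 := by decide
  have sr0 : (1 : Int) <<< ((0 : Int)) = 1 := by decide
  have ss0 : (1 : Int) <<< ((8 : Int) + 0) = 256 := by decide
  have sp1 : (1 : Int) <<< ((15 : Int) - 1) = 16384 := by decide
  have sq1 : (1 : Int) <<< ((7 : Int) - 1) = 64 := by decide
  have sr1 : (1 : Int) <<< ((1 : Int)) = 2 := by decide
  have ss1 : (1 : Int) <<< ((8 : Int) + 1) = 512 := by decide
  have sp2 : (1 : Int) <<< ((15 : Int) - 2) = 8192 := by decide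
  have sq2 : (1 : Int) <<< ((7 : Int) - 2) = 32 := by decide
  have sr2 : (1 : Int) <<< ((2 : Int)) = 4 := by decide
  have ss2 : (1 : Int) <<< ((8 : Int) + 2) = 1024 := by decide
  have sp3 : (1 : Int) <<< ((15 : Int) - 3) = 4096 := by decide
  have sq3 : (1 : Int) <<< ((7 : Int) - 3) = 16 := by decide
  have sr3 : (1 : Int) <<< ((3 : Int)) = 8 := by decide
  have ss3 : (1 : Int) <<< ((8 : Int) + 3) = 2048 := by decide
  have sp4 : (1 : Int) <<< ((15 : Int) - 4) = 2048 := by decide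
  have sq4 : (1 : Int) <<< ((7 : Int) - 4) = 8 := by decide
  have sr4 : (1 : Int) <<< ((4 : Int)) = 16 := by decide
  have ss4 : (1 : Int) <<< ((8 : Int) + 4) = 4096 := by decide
  have sp5 : (1 : Int) <<< ((15 : Int) - 5) = 1024 := by decide
  have sq5 : (1 : Int) <<< ((7 : Int) - 5) = 4 := by decide
  have sr5 : (1 : Int) <<< ((5 : Int)) = 32 := by decide
  have ss5 : (1 : Int) <<< ((8 : Int) + 5) = 8192 := by decide
  have sp6 : (1 : Int) <<< ((15 : Int) - 6) = 512 := by decide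
  have sq6 : (1 : Int) <<< ((7 : Int) - 6) = 2 := by decide
  have sr6 : (1 : Int) <<< ((6 : Int)) = 64 := by decide
  have ss6 : (1 : Int) <<< ((8 : Int) + 6) = 16384 := by decide
  have sp7 : (1 : Int) <<< ((15 : Int) - 7) = 256 := by decide
  have sq7 : (1 : Int) <<< ((7 : Int) - 7) = 1 := by decide
  have sr7 : (1 : Int) <<< ((7 : Int)) = 128 := by decide
  have ss7 : (1 : Int) <<< ((8 : Int) + 7) = 32768 := by decide
  have nd0 : "D" ++ PySem.Int.toStr (0 : Int) = "D0" := by decide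
  have na0 : "A" ++ PySem.Int.toStr (0 : Int) = "A0" := by decide
  have nd1 : "D" ++ PySem.Int.toStr (1 : Int) = "D1" := by decide
  have na1 : "A" ++ PySem.Int.toStr (1 : Int) = "A1" := by decide
  have nd2 : "D" ++ PySem.Int.toStr (2 : Int) = "D2" := by decide
  have na2 : "A" ++ PySem.Int.toStr (2 : Int) = "A2" := by decide
  have nd3 : "D" ++ PySem.Int.toStr (3 : Int) = "D3" := by decide
  have na3 : "A" ++ PySem.Int.toStr (3 : Int) = "A3" := by decide
  have nd4 : "D" ++ PySem.Int.toStr (4 : Int) = "D4" := by decide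
  have na4 : "A" ++ PySem.Int.toStr (4 : Int) = "A4" := by decide
  have nd5 : "D" ++ PySem.Int.toStr (5 : Int) = "D5" := by decide
  have na5 : "A" ++ PySem.Int.toStr (5 : Int) = "A5" := by decide
  have nd6 : "D" ++ PySem.Int.toStr (6 : Int) = "D6" := by decide
  have na6 : "A" ++ PySem.Int.toStr (6 : Int) = "A6" := by decide
  have nd7 : "D" ++ PySem.Int.toStr (7 : Int) = "D7" := by decide
  have na7 : "A" ++ PySem.Int.toStr (7 : Int) = "A7" := by decide
  have pnf0 : pvName (0 : Int) false = "D0" := by decide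
  have pnt0 : pvName (0 : Int) true = "A7" := by decide
  have pnf1 : pvName (1 : Int) false = "D1" := by decide
  have pnt1 : pvName (1 : Int) true = "A6" := by decide
  have pnf2 : pvName (2 : Int) false = "D2" := by decide
  have pnt2 : pvName (2 : Int) true = "A5" := by decide
  have pnf3 : pvName (3 : Int) false = "D3" := by decide
  have pnt3 : pvName (3 : Int) true = "A4" := by decide
  have pnf4 : pvName (4 : Int) false = "D4" := by decide
  have pnt4 : pvName (4 : Int) true = "A3" := by decide
  have pnf5 : pvName (5 : Int) false = "D5" := by decide
  have pnt5 : pvName (5 : Int) true = "A2" := by decide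
  have pnf6 : pvName (6 : Int) false = "D6" := by decide
  have pnt6 : pvName (6 : Int) true = "A1" := by decide
  have pnf7 : pvName (7 : Int) false = "D7" := by decide
  have pnt7 : pvName (7 : Int) true = "A0" := by decide
  have pnf8 : pvName (8 : Int) false = "A0" := by decide
  have pnt8 : pvName (8 : Int) true = "D7" := by decide
  have pnf9 : pvName (9 : Int) false = "A1" := by decide
  have pnt9 : pvName (9 : Int) true = "D6" := by decide
  have pnf10 : pvName (10 : Int) false = "A2" := by decide
  have pnt10 : pvName (10 : Int) true = "D5" := by decide
  have pnf11 : pvName (11 : Int) false = "A3" := by decide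
  have pnt11 : pvName (11 : Int) true = "D4" := by decide
  have pnf12 : pvName (12 : Int) false = "A4" := by decide
  have pnt12 : pvName (12 : Int) true = "D3" := by decide
  have pnf13 : pvName (13 : Int) false = "A5" := by decide
  have pnt13 : pvName (13 : Int) true = "D2" := by decide
  have pnf14 : pvName (14 : Int) false = "A6" := by decide
  have pnt14 : pvName (14 : Int) true = "D1" := by decide
  have pnf15 : pvName (15 : Int) false = "A7" := by decide
  have pnt15 : pvName (15 : Int) true = "D0" := by decide
  have hR8 : PySem.List.pyRange 0 8 1 = [0, 1, 2, 3, 4, 5, 6, 7] := by decide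
  have hR16 : List.range 16 = [0, 1, 2, 3, 4, 5, 6, 7, 8, 9, 10, 11, 12, 13, 14, 15] := by decide
  cases predecrement
  case false =>
    have hdec := pv_decode_emit false 16 (mask % 65536).toNat 0 hmlt
    simp only [hR16, List.map_cons, List.map_nil, pv_testBit_pvBit, Nat.cast_ofNat,
      Nat.cast_zero, Nat.cast_one, zero_add, pnf0, pnf1, pnf2, pnf3, pnf4, pnf5, pnf6, pnf7, pnf8, pnf9, pnf10, pnf11, pnf12, pnf13, pnf14, pnf15] at hdec
    simp only [format_movem_mask, format_movem_mask_alt, hbl, hdec, hR8,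
      Bool.false_eq_true, if_false, pv_foldl_emit, List.map_cons, List.map_nil,
      c0, c1, c2, c3, c4, c5, c6, c7, c8, c9, c10, c11, c12, c13, c14, c15, sp0, sq0, sr0, ss0, sp1, sq1, sr1, ss1, sp2, sq2, sr2, ss2, sp3, sq3, sr3, ss3, sp4, sq4, sr4, ss4, sp5, sq5, sr5, ss5, sp6, sq6, sr6, ss6, sp7, sq7, sr7, ss7, nd0, na0, nd1, na1, nd2, na2, nd3, na3, nd4, na4, nd5, na5, nd6, na6, nd7, na7,
      pv_decide_bool, List.nil_append]
    simp only [List.nil_append, ← pvEmit_append, List.cons_append]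
  case true =>
    have hdec := pv_decode_emit true 16 (mask % 65536).toNat 0 hmlt
    simp only [hR16, List.map_cons, List.map_nil, pv_testBit_pvBit, Nat.cast_ofNat,
      Nat.cast_zero, Nat.cast_one, zero_add, pnt0, pnt1, pnt2, pnt3, pnt4, pnt5, pnt6, pnt7, pnt8, pnt9, pnt10, pnt11, pnt12, pnt13, pnt14, pnt15] at hdec
    simp only [format_movem_mask, format_movem_mask_alt, hbl, hdec, hR8,
      if_true, pv_foldl_emit, List.map_cons, List.map_nil,
      c0, c1, c2, c3, c4, c5, c6, c7, c8, c9, c10, c11, c12, c13, c14, c15, sp0, sq0, sr0, ss0, sp1, sq1, sr1, ss1, sp2, sq2, sr2, ss2, sp3, sq3, sr3, ss3, sp4, sq4, sr4, ss4, sp5, sq5, sr5, ss5, sp6, sq6, sr6, ss6, sp7, sq7, sr7, ss7, nd0, na0, nd1, na1, nd2, na2, nd3, na3, nd4, na4, nd5, na5, nd6, na6, nd7, na7,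
      pv_decide_bool, ← pvEmit_reverse, List.reverse_cons, List.reverse_nil,
      List.nil_append, List.cons_append]
    simp only [List.nil_append, ← pvEmit_append, List.cons_append]
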